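-- pv_equiv track=rewrite | github.com/quoth-le-corbeau/advent_of_code | advent_2020/day_7/solutions.py | _dfs_sum_node_values
-- ===== SOURCE A (Python) =====
-- def _dfs_sum_node_values(graph: dict[str, set[str]], node_colour: str) -> int:
--     if node_colour == "shiny gold":
--         pass
--     else:
--         node_colour = " ".join(node_colour.split(" ")[1:])
--
--     count = 0
--     if node_colour in graph:
--         for child in graph[node_colour]:
--             n = int(child.split(" ")[0].strip())
--             count += n
--             count += n * _dfs_sum_node_values(graph, child)
--     return count
-- ===== SOURCE B (Python) =====
-- def _dfs_sum_node_values(graph: dict[str, set[str]], node_colour: str) -> int: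
--     # DP over the bag DAG: memoize the subtree sum per (normalized) colour key,
--     # so each colour is expanded once instead of once per occurrence.
--     memo = {}
--
--     def _key(colour: str) -> str:
--         if colour == "shiny gold":
--             return colour
--         return " ".join(colour.split(" ")[1:])
--
--     def total(key: str) -> int:
--         if key in memo:
--             return memo[key]
--         acc = 0
--         for child in graph.get(key, ()):
--             n = int(child.split(" ")[0].strip())
--             acc += n * (1 + total(_key(child)))
--         memo[key] = acc
--         return acc
--
--     return total(_key(node_colour))
-- ===== Notes on version B (the rewrite author's own statement) =====
-- stated objective: alternative
-- what changed: B replaces A's naive DFS (which re-expands a colour's whole subtree at every occurrence) by the same DFS with a memo dict keyed by normalized colour, so each colour's subtree sum is computed once (DP over the DAG); intended as asymptotically faster on graphs with shared subtrees, but a timing run's inputs did not confirm a speed-up, so none is claimed.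
import Mathlib
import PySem

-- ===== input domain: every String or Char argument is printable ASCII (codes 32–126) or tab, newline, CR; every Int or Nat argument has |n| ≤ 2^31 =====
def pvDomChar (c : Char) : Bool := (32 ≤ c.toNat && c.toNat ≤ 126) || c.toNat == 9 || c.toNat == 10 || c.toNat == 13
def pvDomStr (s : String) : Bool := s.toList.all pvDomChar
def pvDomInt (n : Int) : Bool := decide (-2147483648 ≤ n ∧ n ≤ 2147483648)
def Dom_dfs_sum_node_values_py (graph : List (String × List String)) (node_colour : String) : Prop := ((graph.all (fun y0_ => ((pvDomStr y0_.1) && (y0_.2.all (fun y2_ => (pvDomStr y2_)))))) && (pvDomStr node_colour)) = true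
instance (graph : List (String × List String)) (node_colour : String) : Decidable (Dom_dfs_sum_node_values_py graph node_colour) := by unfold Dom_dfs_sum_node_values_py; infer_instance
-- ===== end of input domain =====

-- ===== PORT A =====
-- B memoizes the subtree sum per normalized colour key (DP over the DAG); A re-expands every occurrence.
-- Both ports use fuel graph.length+1, which only makes the DFS total: under Pre_ (the reachable part of
-- the graph is acyclic) the recursion depth never exceeds it.
def pvDfsA (graph : List (String × List String)) : Nat → String → Int
  | 0, _ => 0
  | fuel+1, node_colour0 =>
    let node_colour := if node_colour0 == "shiny gold" then node_colour0
      else PySem.Str.join " " (((PySem.Str.split? node_colour0 " ").getD []).tail)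
    match (PySem.Dict.mk graph).get? node_colour with
    | none => 0
    | some children =>
      children.foldl (fun count child =>
        let n := (PySem.Int.ofStr? (PySem.Str.strip
          (((PySem.Str.split? child " ").getD []).headD ""))).getD 0
        count + n + n * pvDfsA graph fuel child) 0

def dfs_sum_node_values_py (graph : List (String × List String)) (node_colour : String) : Int :=
  pvDfsA graph (graph.length + 1) node_colour

-- ===== PORT B =====
-- helpers of Source B: the `_key` normalization and the `int(child.split(" ")[0].strip())` parse
def pvNormKey (s : String) : String :=
  if s == "shiny gold" then s
  else PySem.Str.join " " (((PySem.Str.split? s " ").getD []).tail)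

def pvChildN (c : String) : Int :=
  (PySem.Int.ofStr? (PySem.Str.strip (((PySem.Str.split? c " ").getD []).headD ""))).getD 0

def pvDfsB (graph : List (String × List String)) :
    Nat → PySem.Dict String Int → String → Int × PySem.Dict String Int
  | 0, memo, _ => (0, memo)
  | fuel+1, memo, key =>
    match memo.get? key with
    | some v => (v, memo)
    | none =>
      let res := ((PySem.Dict.mk graph).getD key []).foldl
        (fun (p : Int × PySem.Dict String Int) child =>
          let n := pvChildN child
          let r := pvDfsB graph fuel p.2 (pvNormKey child)
          (p.1 + n * (1 + r.1), r.2)) (0, memo)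
      (res.1, res.2.insert key res.1)

def dfs_sum_node_values_py_alt (graph : List (String × List String)) (node_colour : String) : Int :=
  (pvDfsB graph (graph.length + 1) PySem.Dict.empty (pvNormKey node_colour)).1

-- ===== PRECONDITION & SPEC =====
-- reachability over the bag graph: pvRset graph k is the set of colour keys reachable from k
-- (standard bounded-iteration transitive closure; graph.length+1 iterations saturate it)
def pvLive (graph : List (String × List String)) (x : String) : Bool :=
  ((PySem.Dict.mk graph).get? x).isSome

def pvKids (graph : List (String × List String)) (k : String) : List String :=
  (((PySem.Dict.mk graph).getD k []).map pvNormKey).filter (pvLive graph)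

def pvStepAux (graph : List (String × List String)) (S : Finset String) :
    List (String × List String) → Finset String → Finset String
  | [], acc => acc
  | p :: l, acc =>
    if p.1 ∈ S then pvStepAux graph S l acc ∪ (pvKids graph p.1).toFinset
    else pvStepAux graph S l acc

def pvStep (graph : List (String × List String)) (S : Finset String) : Finset String :=
  pvStepAux graph S graph S

def pvRset (graph : List (String × List String)) (k : String) : Finset String :=
  (pvStep graph)^[graph.length + 1] {k}

-- Pre_ excludes exactly the inputs on which Python A raises: a ValueError when some child of a
-- REACHABLE bag has a first token int() rejects, or unbounded recursion when a reachable bag lies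
-- on a cycle; on every input where A returns normally Pre_ holds and B is proved to match.
def Pre_dfs_sum_node_values_py (graph : List (String × List String)) (node_colour : String) : Prop :=
  ∀ k ∈ pvRset graph (pvNormKey node_colour),
    ∀ c ∈ (PySem.Dict.mk graph).getD k [],
      (PySem.Int.ofStr? (PySem.Str.strip
        (((PySem.Str.split? c " ").getD []).headD ""))).isSome = true ∧
      k ∉ pvRset graph (pvNormKey c)
instance (graph : List (String × List String)) (node_colour : String) :
    Decidable (Pre_dfs_sum_node_values_py graph node_colour) := by
  unfold Pre_dfs_sum_node_values_py; infer_instance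

def pvWitness_dfs_sum_node_values_py : (List (String × List String)) × String :=
  ([("shiny gold", ["2 dull red", "3 faded blue"]), ("dull red", ["4 faded blue"])], "shiny gold")

def Spec_dfs_sum_node_values_py (graph : List (String × List String)) (node_colour : String) (out : Int) : Prop := out = dfs_sum_node_values_py_alt graph node_colour
instance (graph : List (String × List String)) (node_colour : String) (out : Int) : Decidable (Spec_dfs_sum_node_values_py graph node_colour out) := by unfold Spec_dfs_sum_node_values_py; infer_instance

-- ===== CLAIM (what is proved, stated in full; the proofs are below) =====
def Claim_equal_dfs_sum_node_values_py : Prop := ∀ (graph : List (String × List String)) (node_colour : String), Dom_dfs_sum_node_values_py graph node_colour → Pre_dfs_sum_node_values_py graph node_colour → Spec_dfs_sum_node_values_py graph node_colour (dfs_sum_node_values_py graph node_colour)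

-- ===== LEMMAS AND PROOFS =====
-- the recursion of A on normalized keys with explicit fuel (proof-side reference function)
def pvVal (graph : List (String × List String)) : Nat → String → Int
  | 0, _ => 0
  | fuel+1, key =>
    match (PySem.Dict.mk graph).get? key with
    | none => 0
    | some children =>
      children.foldl (fun count child =>
        count + pvChildN child + pvChildN child * pvVal graph fuel (pvNormKey child)) 0

-- proof-side measure: size of the reach set of a live key (0 for a dead key); it strictly
-- decreases along edges of the reachable acyclic part
def pvMeas (graph : List (String × List String)) (k : String) : Nat :=
  if pvLive graph k then (pvRset graph k).card else 0

def pvGood (graph : List (String × List String)) (s k : String) : Prop :=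
  k ∈ pvRset graph s ∨ pvLive graph k = false

def pvInv (graph : List (String × List String)) (memo : PySem.Dict String Int) : Prop :=
  ∀ k v, memo.get? k = some v → v = pvVal graph (pvMeas graph k + 1) k

lemma pv_get?_mem {graph : List (String × List String)} {k : String} {cs : List String}
    (h : (PySem.Dict.mk graph).get? k = some cs) : ∃ p ∈ graph, p.1 = k ∧ p.2 = cs := by
  induction graph with
  | nil => simp [PySem.Dict.get?] at h
  | cons p rest ih =>
    rw [show (PySem.Dict.mk (p :: rest)) = PySem.Dict.mk ((p.1, p.2) :: rest) by rfl,
      PySem.Dict.get?_mk_cons] at h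
    by_cases hk : p.1 == k
    · simp [hk] at h
      exact ⟨p, List.mem_cons_self, eq_of_beq hk, h⟩
    · simp [hk] at h
      obtain ⟨q, hq, h1, h2⟩ := ih h
      exact ⟨q, List.mem_cons_of_mem p hq, h1, h2⟩

lemma pv_getD_eq {graph : List (String × List String)} {k : String} {cs : List String}
    (h : (PySem.Dict.mk graph).get? k = some cs) : (PySem.Dict.mk graph).getD k [] = cs := by
  rw [show (PySem.Dict.mk graph).getD k [] = ((PySem.Dict.mk graph).get? k).getD [] from rfl, h]
  rfl

lemma pv_live_mem_keys {graph : List (String × List String)} {x : String}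
    (h : pvLive graph x = true) : x ∈ (graph.map (·.1)).toFinset := by
  unfold pvLive at h
  cases hg : (PySem.Dict.mk graph).get? x with
  | none => rw [hg] at h; simp at h
  | some cs =>
    obtain ⟨p, hp, h1, -⟩ := pv_get?_mem hg
    exact List.mem_toFinset.mpr (List.mem_map.mpr ⟨p, hp, h1⟩)

lemma pv_kids_subset_keys (graph : List (String × List String)) (k : String) :
    (pvKids graph k).toFinset ⊆ (graph.map (·.1)).toFinset := by
  intro x hx
  rw [List.mem_toFinset, pvKids, List.mem_filter] at hx
  exact pv_live_mem_keys hx.2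

lemma pv_stepAux_acc_subset (graph : List (String × List String)) (S : Finset String) :
    ∀ (l : List (String × List String)) (acc : Finset String), acc ⊆ pvStepAux graph S l acc := by
  intro l
  induction l with
  | nil => intro acc; exact fun x hx => hx
  | cons p l ih =>
    intro acc
    simp only [pvStepAux]
    split_ifs
    · exact fun x hx => Finset.mem_union_left _ (ih acc hx)
    · exact ih acc

lemma pv_stepAux_mono {graph : List (String × List String)} {S T : Finset String}
    (hST : S ⊆ T) : ∀ (l : List (String × List String)) {acc acc' : Finset String},
      acc ⊆ acc' → pvStepAux graph S l acc ⊆ pvStepAux graph T l acc' := by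
  intro l
  induction l with
  | nil => intro acc acc' h; exact h
  | cons p l ih =>
    intro acc acc' h
    simp only [pvStepAux]
    by_cases hp : p.1 ∈ S
    · rw [if_pos hp, if_pos (hST hp)]
      exact Finset.union_subset_union_left (ih h)
    · rw [if_neg hp]
      split_ifs
      · exact fun x hx => Finset.mem_union_left _ (ih h hx)
      · exact ih h

lemma pv_stepAux_mem {graph : List (String × List String)} {S : Finset String}
    {p : String × List String} (hpS : p.1 ∈ S) :
    ∀ (l : List (String × List String)) (acc : Finset String), p ∈ l →
      (pvKids graph p.1).toFinset ⊆ pvStepAux graph S l acc := by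
  intro l
  induction l with
  | nil => intro acc h; cases h
  | cons q l ih =>
    intro acc hmem
    simp only [pvStepAux]
    rcases List.mem_cons.mp hmem with rfl | hmem
    · rw [if_pos hpS]
      exact Finset.subset_union_right
    · split_ifs
      · exact fun x hx => Finset.mem_union_left _ (ih acc hmem hx)
      · exact ih acc hmem

lemma pv_stepAux_subset_keys (graph : List (String × List String)) (S : Finset String) :
    ∀ (l : List (String × List String)) (acc : Finset String),
      pvStepAux graph S l acc ⊆ acc ∪ (graph.map (·.1)).toFinset := by
  intro l
  induction l with
  | nil => intro acc; exact Finset.subset_union_left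
  | cons p l ih =>
    intro acc
    simp only [pvStepAux]
    split_ifs
    · exact Finset.union_subset (ih acc)
        (fun x hx => Finset.mem_union_right _ (pv_kids_subset_keys graph p.1 hx))
    · exact ih acc

lemma pv_subset_step (graph : List (String × List String)) (S : Finset String) :
    S ⊆ pvStep graph S := pv_stepAux_acc_subset graph S graph S

lemma pv_step_mono {graph : List (String × List String)} {S T : Finset String}
    (h : S ⊆ T) : pvStep graph S ⊆ pvStep graph T := pv_stepAux_mono h graph h

lemma pv_step_subset (graph : List (String × List String)) (S : Finset String) :
    pvStep graph S ⊆ S ∪ (graph.map (·.1)).toFinset := pv_stepAux_subset_keys graph S graph S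

lemma pv_chain_le (graph : List (String × List String)) (k : String) {i j : Nat} (h : i ≤ j) :
    (pvStep graph)^[i] {k} ⊆ (pvStep graph)^[j] {k} := by
  induction j with
  | zero => rw [Nat.le_zero.mp h]
  | succ j ih =>
    rcases Nat.lt_or_ge i (j + 1) with hj | hj
    · rw [Function.iterate_succ_apply']
      exact fun x hx => pv_subset_step graph _ (ih (by omega) hx)
    · rw [show i = j + 1 by omega]

lemma pv_iter_subset_keys (graph : List (String × List String)) (k : String) (i : Nat) :
    (pvStep graph)^[i] {k} ⊆ {k} ∪ (graph.map (·.1)).toFinset := by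
  induction i with
  | zero => exact Finset.subset_union_left
  | succ i ih =>
    rw [Function.iterate_succ_apply']
    intro x hx
    rcases Finset.mem_union.mp (pv_step_subset graph _ hx) with h | h
    · exact ih h
    · exact Finset.mem_union_right _ h

lemma pv_fix_exists (graph : List (String × List String)) (k : String) :
    ∃ i ≤ graph.length, (pvStep graph)^[i] {k} = (pvStep graph)^[i+1] {k} := by
  by_contra hne
  push Not at hne
  have hcard : ∀ i, i ≤ graph.length + 1 → i + 1 ≤ ((pvStep graph)^[i] {k}).card := by
    intro i
    induction i with
    | zero => intro _; simp
    | succ i ih =>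
      intro hi
      have h1 := ih (by omega)
      have hss : (pvStep graph)^[i] {k} ⊂ (pvStep graph)^[i+1] {k} :=
        (Finset.ssubset_iff_subset_ne).mpr
          ⟨pv_chain_le graph k (by omega), hne i (by omega)⟩
      have := Finset.card_lt_card hss
      omega
  have h2 := hcard (graph.length + 1) le_rfl
  have h3 : ((pvStep graph)^[graph.length + 1] {k}).card ≤ graph.length + 1 := by
    calc ((pvStep graph)^[graph.length + 1] {k}).card
        ≤ ({k} ∪ (graph.map (·.1)).toFinset).card :=
          Finset.card_le_card (pv_iter_subset_keys graph k _)
      _ ≤ ({k} : Finset String).card + (graph.map (·.1)).toFinset.card :=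
          Finset.card_union_le _ _
      _ ≤ 1 + graph.length := by
          have := List.toFinset_card_le (graph.map (·.1))
          simp only [List.length_map] at this
          simp only [Finset.card_singleton]
          omega
      _ = graph.length + 1 := by omega
  omega

lemma pv_Rset_fix (graph : List (String × List String)) (k : String) :
    pvStep graph (pvRset graph k) = pvRset graph k := by
  obtain ⟨i, hi, hfix⟩ := pv_fix_exists graph k
  have hstable : ∀ j, i ≤ j → (pvStep graph)^[j] {k} = (pvStep graph)^[i] {k} := by
    intro j
    induction j with
    | zero => intro h; rw [Nat.le_zero.mp h]
    | succ j ih =>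
      intro h
      rcases Nat.lt_or_ge i (j + 1) with hj | hj
      · rw [Function.iterate_succ_apply' (pvStep graph) j ({k} : Finset String), ih (by omega)]
        exact ((Function.iterate_succ_apply' (pvStep graph) i {k}).symm.trans hfix.symm)
      · rw [show i = j + 1 by omega]
  have h1 : pvRset graph k = (pvStep graph)^[i] {k} := hstable (graph.length + 1) (by omega)
  calc pvStep graph (pvRset graph k)
      = pvStep graph ((pvStep graph)^[i] {k}) := by rw [h1]
    _ = (pvStep graph)^[i+1] {k} := (Function.iterate_succ_apply' (pvStep graph) i {k}).symm
    _ = (pvStep graph)^[i] {k} := hfix.symm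
    _ = pvRset graph k := h1.symm

lemma pv_self_mem_Rset (graph : List (String × List String)) (k : String) :
    k ∈ pvRset graph k :=
  pv_chain_le graph k (Nat.zero_le _) (Finset.mem_singleton_self k)

lemma pv_closure {graph : List (String × List String)} {s x : String} {cs : List String}
    (hx : x ∈ pvRset graph s) (hg : (PySem.Dict.mk graph).get? x = some cs)
    {c : String} (hc : c ∈ cs) (hl : pvLive graph (pvNormKey c) = true) :
    pvNormKey c ∈ pvRset graph s := by
  obtain ⟨p, hp, hp1, -⟩ := pv_get?_mem hg
  have hkid : pvNormKey c ∈ (pvKids graph p.1).toFinset := by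
    rw [List.mem_toFinset, pvKids, hp1, pv_getD_eq hg, List.mem_filter]
    exact ⟨List.mem_map.mpr ⟨c, hc, rfl⟩, hl⟩
  have hmem : pvNormKey c ∈ pvStep graph (pvRset graph s) :=
    pv_stepAux_mem (by rw [hp1]; exact hx) graph (pvRset graph s) hp hkid
  rwa [pv_Rset_fix graph s] at hmem

lemma pv_Rset_subset {graph : List (String × List String)} {s c : String}
    (hc : c ∈ pvRset graph s) : pvRset graph c ⊆ pvRset graph s := by
  have : ∀ i, (pvStep graph)^[i] {c} ⊆ pvRset graph s := by
    intro i
    induction i with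
    | zero => simpa using Finset.singleton_subset_iff.mpr hc
    | succ i ih =>
      rw [Function.iterate_succ_apply']
      calc pvStep graph ((pvStep graph)^[i] {c})
          ⊆ pvStep graph (pvRset graph s) := pv_step_mono ih
        _ = pvRset graph s := pv_Rset_fix graph s
  exact this (graph.length + 1)

lemma pv_live_of_get? {graph : List (String × List String)} {k : String} {cs : List String}
    (hg : (PySem.Dict.mk graph).get? k = some cs) : pvLive graph k = true := by
  rw [pvLive, hg]; rfl

lemma pv_meas_pos {graph : List (String × List String)} {k : String} {cs : List String}
    (hg : (PySem.Dict.mk graph).get? k = some cs) : 0 < pvMeas graph k := by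
  rw [pvMeas, if_pos (pv_live_of_get? hg)]
  exact Finset.card_pos.mpr ⟨k, pv_self_mem_Rset graph k⟩

lemma pv_meas_le (graph : List (String × List String)) (k : String) :
    pvMeas graph k ≤ graph.length := by
  rw [pvMeas]
  split_ifs with hl
  · have hsub : pvRset graph k ⊆ (graph.map (·.1)).toFinset := by
      intro x hx
      rcases Finset.mem_union.mp (pv_iter_subset_keys graph k _ hx) with h | h
      · rw [Finset.mem_singleton.mp h]; exact pv_live_mem_keys hl
      · exact h
    calc (pvRset graph k).card ≤ (graph.map (·.1)).toFinset.card := Finset.card_le_card hsub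
      _ ≤ (graph.map (·.1)).length := List.toFinset_card_le _
      _ = graph.length := List.length_map _
  · omega

lemma pv_meas_lt {graph : List (String × List String)} {s : String}
    (hacyc : ∀ k ∈ pvRset graph s, ∀ c ∈ (PySem.Dict.mk graph).getD k [],
      k ∉ pvRset graph (pvNormKey c))
    {k : String} (hk : k ∈ pvRset graph s)
    {cs : List String} (hg : (PySem.Dict.mk graph).get? k = some cs)
    {c : String} (hc : c ∈ cs) :
    pvMeas graph (pvNormKey c) < pvMeas graph k ∧ pvGood graph s (pvNormKey c) := by
  have hkmeas : pvMeas graph k = (pvRset graph k).card := by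
    rw [pvMeas, if_pos (pv_live_of_get? hg)]
  cases hl : pvLive graph (pvNormKey c) with
  | false =>
    refine ⟨?_, Or.inr hl⟩
    rw [pvMeas, hl, if_neg (by simp), hkmeas]
    exact Finset.card_pos.mpr ⟨k, pv_self_mem_Rset graph k⟩
  | true =>
    refine ⟨?_, Or.inl (pv_closure hk hg hc hl)⟩
    rw [pvMeas, if_pos hl, hkmeas]
    apply Finset.card_lt_card
    rw [Finset.ssubset_iff_of_subset
      (pv_Rset_subset (pv_closure (pv_self_mem_Rset graph k) hg hc hl))]
    refine ⟨k, pv_self_mem_Rset graph k, ?_⟩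
    exact hacyc k hk c (by rw [pv_getD_eq hg]; exact hc)

lemma pv_val_stable {graph : List (String × List String)} {s : String}
    (hacyc : ∀ k ∈ pvRset graph s, ∀ c ∈ (PySem.Dict.mk graph).getD k [],
      k ∉ pvRset graph (pvNormKey c)) :
    ∀ (r : Nat) (k : String), pvGood graph s k → pvMeas graph k ≤ r →
      ∀ f g, pvMeas graph k < f → pvMeas graph k < g →
      pvVal graph f k = pvVal graph g k := by
  intro r
  induction r with
  | zero =>
    intro k _ hk f g hf hg
    obtain ⟨f', rfl⟩ : ∃ f', f = f' + 1 := ⟨f - 1, by omega⟩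
    obtain ⟨g', rfl⟩ : ∃ g', g = g' + 1 := ⟨g - 1, by omega⟩
    simp only [pvVal]
    cases h : (PySem.Dict.mk graph).get? k with
    | none => rfl
    | some cs => exact absurd (pv_meas_pos h) (by omega)
  | succ r ih =>
    intro k hgood hk f g hf hg
    obtain ⟨f', rfl⟩ : ∃ f', f = f' + 1 := ⟨f - 1, by omega⟩
    obtain ⟨g', rfl⟩ : ∃ g', g = g' + 1 := ⟨g - 1, by omega⟩
    simp only [pvVal]
    cases h : (PySem.Dict.mk graph).get? k with
    | none => rfl
    | some cs =>
      have hks : k ∈ pvRset graph s := by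
        rcases hgood with h' | h'
        · exact h'
        · rw [pv_live_of_get? h] at h'; cases h'
      refine PySem.List.foldl_congr_mem cs _ _ 0 ?_
      intro acc c hc
      obtain ⟨hlt, hgc⟩ := pv_meas_lt hacyc hks h hc
      rw [ih (pvNormKey c) hgc (by omega) f' g' (by omega) (by omega)]

lemma pv_dfsA_eq_val (graph : List (String × List String)) :
    ∀ (f : Nat) (colour : String), pvDfsA graph f colour = pvVal graph f (pvNormKey colour) := by
  intro f
  induction f with
  | zero => intro colour; rfl
  | succ f ih =>
    intro colour
    show (match (PySem.Dict.mk graph).get? (pvNormKey colour) with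
      | none => 0
      | some children =>
        children.foldl (fun count child =>
          count + pvChildN child + pvChildN child * pvDfsA graph f child) 0) =
      pvVal graph (f + 1) (pvNormKey colour)
    simp only [pvVal]
    cases h : (PySem.Dict.mk graph).get? (pvNormKey colour) with
    | none => rfl
    | some cs =>
      refine PySem.List.foldl_congr_mem cs _ _ 0 ?_
      intro acc c _
      rw [ih c]

lemma pvDfsB_succ (graph : List (String × List String)) (f : Nat)
    (memo : PySem.Dict String Int) (key : String) :
    pvDfsB graph (f + 1) memo key =
      match memo.get? key with
      | some v => (v, memo)
      | none =>
        ((((PySem.Dict.mk graph).getD key []).foldl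
            (fun (p : Int × PySem.Dict String Int) child =>
              (p.1 + pvChildN child * (1 + (pvDfsB graph f p.2 (pvNormKey child)).1),
                (pvDfsB graph f p.2 (pvNormKey child)).2)) (0, memo)).1,
          ((((PySem.Dict.mk graph).getD key []).foldl
            (fun (p : Int × PySem.Dict String Int) child =>
              (p.1 + pvChildN child * (1 + (pvDfsB graph f p.2 (pvNormKey child)).1),
                (pvDfsB graph f p.2 (pvNormKey child)).2)) (0, memo)).2).insert key
            ((((PySem.Dict.mk graph).getD key []).foldl
            (fun (p : Int × PySem.Dict String Int) child =>
              (p.1 + pvChildN child * (1 + (pvDfsB graph f p.2 (pvNormKey child)).1),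
                (pvDfsB graph f p.2 (pvNormKey child)).2)) (0, memo)).1)) := rfl

lemma pvDfsB_hit (graph : List (String × List String)) (f : Nat)
    (memo : PySem.Dict String Int) (key : String) {v : Int}
    (hm : memo.get? key = some v) : pvDfsB graph (f + 1) memo key = (v, memo) := by
  rw [pvDfsB_succ, hm]

lemma pvDfsB_miss (graph : List (String × List String)) (f : Nat)
    (memo : PySem.Dict String Int) (key : String) {cs : List String}
    (hm : memo.get? key = none) (hg : (PySem.Dict.mk graph).get? key = some cs) :
    pvDfsB graph (f + 1) memo key =
      ((cs.foldl
          (fun (p : Int × PySem.Dict String Int) child =>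
            (p.1 + pvChildN child * (1 + (pvDfsB graph f p.2 (pvNormKey child)).1),
              (pvDfsB graph f p.2 (pvNormKey child)).2)) (0, memo)).1,
        ((cs.foldl
          (fun (p : Int × PySem.Dict String Int) child =>
            (p.1 + pvChildN child * (1 + (pvDfsB graph f p.2 (pvNormKey child)).1),
              (pvDfsB graph f p.2 (pvNormKey child)).2)) (0, memo)).2).insert key
          ((cs.foldl
          (fun (p : Int × PySem.Dict String Int) child =>
            (p.1 + pvChildN child * (1 + (pvDfsB graph f p.2 (pvNormKey child)).1),
              (pvDfsB graph f p.2 (pvNormKey child)).2)) (0, memo)).1)) := by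
  rw [pvDfsB_succ, hm, pv_getD_eq hg]

lemma pvDfsB_notfound (graph : List (String × List String)) (f : Nat)
    (memo : PySem.Dict String Int) (key : String)
    (hm : memo.get? key = none) (hg : (PySem.Dict.mk graph).get? key = none) :
    pvDfsB graph (f + 1) memo key = (0, memo.insert key 0) := by
  rw [pvDfsB_succ, hm]
  have hgd : (PySem.Dict.mk graph).getD key [] = [] := by
    rw [show (PySem.Dict.mk graph).getD key [] =
      ((PySem.Dict.mk graph).get? key).getD [] from rfl, hg]
    rfl
  rw [hgd]
  rfl

lemma pvVal_found (graph : List (String × List String)) (f : Nat) (key : String)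
    {cs : List String} (hg : (PySem.Dict.mk graph).get? key = some cs) :
    pvVal graph (f + 1) key =
      cs.foldl (fun count child =>
        count + pvChildN child + pvChildN child * pvVal graph f (pvNormKey child)) 0 := by
  simp only [pvVal, hg]

lemma pvVal_notfound (graph : List (String × List String)) (f : Nat) (key : String)
    (hg : (PySem.Dict.mk graph).get? key = none) : pvVal graph (f + 1) key = 0 := by
  simp only [pvVal, hg]

lemma pv_dfsB_correct {graph : List (String × List String)} {s : String}
    (hacyc : ∀ k ∈ pvRset graph s, ∀ c ∈ (PySem.Dict.mk graph).getD k [],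
      k ∉ pvRset graph (pvNormKey c)) :
    ∀ (f : Nat) (key : String) (memo : PySem.Dict String Int),
      pvGood graph s key → pvMeas graph key < f → pvInv graph memo →
      (pvDfsB graph f memo key).1 = pvVal graph (pvMeas graph key + 1) key ∧
        pvInv graph (pvDfsB graph f memo key).2 := by
  intro f
  induction f with
  | zero => intro key memo _ hf _; exact absurd hf (by omega)
  | succ f ih =>
    intro key memo hgood hf hinv
    cases hm : memo.get? key with
    | some v => rw [pvDfsB_hit graph f memo key hm]; exact ⟨hinv key v hm, hinv⟩
    | none =>
      cases hg : (PySem.Dict.mk graph).get? key with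
      | none =>
        rw [pvDfsB_notfound graph f memo key hm hg, pvVal_notfound graph _ key hg]
        refine ⟨rfl, ?_⟩
        intro k v hkv
        rw [PySem.Dict.get?_insert] at hkv
        split at hkv
        · rename_i heq
          subst heq
          cases hkv
          rw [pvVal_notfound graph _ k hg]
        · exact hinv k v hkv
      | some cs =>
        have hks : key ∈ pvRset graph s := by
          rcases hgood with h' | h'
          · exact h'
          · rw [pv_live_of_get? hg] at h'; cases h'
        rw [pvDfsB_miss graph f memo key hm hg,
          pvVal_found graph (pvMeas graph key) key hg]
        have hfold : ∀ (l : List String), (∀ c ∈ l, c ∈ cs) →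
            ∀ (acc : Int) (memo' : PySem.Dict String Int), pvInv graph memo' →
            (l.foldl (fun (p : Int × PySem.Dict String Int) child =>
              (p.1 + pvChildN child * (1 + (pvDfsB graph f p.2 (pvNormKey child)).1),
                (pvDfsB graph f p.2 (pvNormKey child)).2)) (acc, memo')).1 =
              l.foldl (fun count child =>
                count + pvChildN child + pvChildN child *
                  pvVal graph (pvMeas graph key) (pvNormKey child)) acc ∧
            pvInv graph (l.foldl (fun (p : Int × PySem.Dict String Int) child =>
              (p.1 + pvChildN child * (1 + (pvDfsB graph f p.2 (pvNormKey child)).1),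
                (pvDfsB graph f p.2 (pvNormKey child)).2)) (acc, memo')).2 := by
          intro l
          induction l with
          | nil => intro _ acc memo' hi; exact ⟨rfl, hi⟩
          | cons c l ihl =>
            intro hsub acc memo' hi
            obtain ⟨hlt, hgc⟩ := pv_meas_lt hacyc hks hg (hsub c (List.mem_cons_self))
            have hrec := ih (pvNormKey c) memo' hgc (by omega) hi
            have h1 : (pvDfsB graph f memo' (pvNormKey c)).1 =
                pvVal graph (pvMeas graph key) (pvNormKey c) := by
              rw [hrec.1]
              exact pv_val_stable hacyc (pvMeas graph (pvNormKey c)) _ hgc le_rfl _ _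
                (by omega) (by omega)
            simp only [List.foldl_cons, h1]
            have harith : acc + pvChildN c * (1 + pvVal graph (pvMeas graph key) (pvNormKey c)) =
                acc + pvChildN c + pvChildN c * pvVal graph (pvMeas graph key) (pvNormKey c) := by
              ring
            rw [harith]
            exact ihl (fun x hx => hsub x (List.mem_cons_of_mem c hx)) _ _ hrec.2
        have hres := hfold cs (fun _ h => h) 0 memo hinv
        refine ⟨hres.1, ?_⟩
        intro k v hkv
        rw [PySem.Dict.get?_insert] at hkv
        split at hkv
        · rename_i heq
          subst heq
          cases hkv
          rw [hres.1, ← pvVal_found graph (pvMeas graph k) k hg]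
        · exact hres.2 k v hkv

-- ===== VERDICT (by name: the statement is the Claim_ definition above) =====
theorem dfs_sum_node_values_py_spec : Claim_equal_dfs_sum_node_values_py := by
  intro graph node_colour _hdom hpre
  unfold Spec_dfs_sum_node_values_py dfs_sum_node_values_py dfs_sum_node_values_py_alt
  rw [pv_dfsA_eq_val graph]
  have hacyc : ∀ k ∈ pvRset graph (pvNormKey node_colour),
      ∀ c ∈ (PySem.Dict.mk graph).getD k [], k ∉ pvRset graph (pvNormKey c) :=
    fun k hk c hc => (hpre k hk c hc).2
  have hgood : pvGood graph (pvNormKey node_colour) (pvNormKey node_colour) :=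
    Or.inl (pv_self_mem_Rset graph _)
  have hmeas := pv_meas_le graph (pvNormKey node_colour)
  have hB := pv_dfsB_correct hacyc (graph.length + 1) (pvNormKey node_colour) PySem.Dict.empty
    hgood (by omega) (by intro k v hv; rw [PySem.Dict.get?_empty] at hv; cases hv)
  rw [hB.1]
  exact pv_val_stable hacyc graph.length _ hgood hmeas _ _ (by omega) (by omega)
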